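-- pv_equiv track=rewrite | github.com/splitkeyboard2024/split-kb-task | solutions/fun.py | parse_generator
-- ===== SOURCE A (Python) =====
-- def parse_generator(input: str) -> str:
--     input = input.strip().replace('?', ' ').replace('!', ' ').replace('\n', ' ').replace('.', ' ').replace(',', ' ')
--     words = input.split()
--
--     def group_words(words, n):
--         for i in range(0, len(words), n):
--             yield words[i:i+n]
--
--     output = [', '.join(group) for group in group_words(words, 5)]
--     return '\n'.join(output)
-- ===== SOURCE B (Python) =====
-- def parse_generator(input: str) -> str:
--     input = input.strip().replace('?', ' ').replace('!', ' ').replace('\n', ' ').replace('.', ' ').replace(',', ' ')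
--     out = []
--     for i, w in enumerate(input.split()):
--         if i > 0:
--             out.append('\n' if i % 5 == 0 else ', ')
--         out.append(w)
--     return ''.join(out)
-- ===== Notes on version B (the rewrite author's own statement) =====
-- stated objective: simpler
-- what changed: Replaces the generator that materializes 5-word sublists and the double join (comma-join per group, then newline-join of the groups) with a single flat pass over the enumerated words that appends the newline or comma-space separator before each word based on its index.
import Mathlib
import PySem

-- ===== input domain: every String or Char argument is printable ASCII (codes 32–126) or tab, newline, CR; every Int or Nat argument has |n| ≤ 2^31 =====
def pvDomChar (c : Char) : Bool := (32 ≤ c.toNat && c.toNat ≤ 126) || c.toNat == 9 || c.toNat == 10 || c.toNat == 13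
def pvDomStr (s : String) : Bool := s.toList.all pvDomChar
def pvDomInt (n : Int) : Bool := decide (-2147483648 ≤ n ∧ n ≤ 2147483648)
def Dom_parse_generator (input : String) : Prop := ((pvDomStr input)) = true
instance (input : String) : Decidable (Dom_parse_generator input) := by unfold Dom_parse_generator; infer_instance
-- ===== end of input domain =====

-- B replaces A's chunk-into-sublists-and-double-join with a single flat pass over the indexed words,
-- emitting '\n' or ', ' before each word from its index; same return value (objective: simpler decomposition).

-- ===== PORT A =====
def parse_generator (input : String) : String :=
  let input := PySem.Str.replace (PySem.Str.replace (PySem.Str.replace (PySem.Str.replace (PySem.Str.replace (PySem.Str.strip input) "?" " ") "!" " ") "\n" " ") "." " ") "," " "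
  let words := PySem.Str.split₀ input
  -- group_words words 5: the generator yields words[i:i+5] for i in range(0, len(words), 5)
  let output := (PySem.List.pyRange 0 (PySem.List.len words) 5).map
    (fun i => PySem.Str.join ", " (PySem.List.slice words (some i) (some (i + 5))))
  PySem.Str.join "\n" output

-- ===== PORT B =====
def parse_generator_alt (input : String) : String :=
  let input := PySem.Str.replace (PySem.Str.replace (PySem.Str.replace (PySem.Str.replace (PySem.Str.replace (PySem.Str.strip input) "?" " ") "!" " ") "\n" " ") "." " ") "," " "
  let out := (PySem.List.enumerate (PySem.Str.split₀ input) 0).foldl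
    (fun (out : List String) p =>
      (if 0 < p.1 then out ++ [if PySem.Int.mod p.1 5 == 0 then "\n" else ", "] else out) ++ [p.2])
    []
  PySem.Str.join "" out

-- ===== PRECONDITION & SPEC =====
def Spec_parse_generator (input : String) (out : String) : Prop := out = parse_generator_alt input
instance (input : String) (out : String) : Decidable (Spec_parse_generator input out) := by unfold Spec_parse_generator; infer_instance

-- ===== CLAIM (what is proved, stated in full; the proofs are below) =====
def Claim_equal_parse_generator : Prop := ∀ (input : String), Dom_parse_generator input → Spec_parse_generator input (parse_generator input)

-- ===== LEMMAS AND PROOFS =====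

-- the separator B writes before the word of index i (0 < i)
def sep5 (i : Int) : List Char := if PySem.Int.mod i 5 == 0 then ['\n'] else [',', ' ']

-- reference: B's flat pass, directly as recursion on the word list carrying the index
def flatRec : List (List Char) → Int → List Char
  | [], _ => []
  | w :: t, i => (if 0 < i then sep5 i else []) ++ w ++ flatRec t (i + 1)

-- reference: A's chunking, directly as take/drop-5 recursion
def chunkJoin (cs : List (List Char)) : List Char :=
  if h : cs = [] then [] else
    PySem.Chars.join [',', ' '] (cs.take 5) ++
      (if cs.drop 5 = [] then [] else '\n' :: chunkJoin (cs.drop 5))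
termination_by cs.length
decreasing_by
  simp only [List.length_drop]
  have : cs.length ≠ 0 := fun hn => h (List.eq_nil_of_length_eq_zero hn)
  omega

lemma join_nil_sep_eq_flatten (L : List (List Char)) : PySem.Chars.join [] L = L.flatten := by
  induction L with
  | nil => simp [PySem.Chars.join_nil]
  | cons a t ih =>
    cases t with
    | nil => simp [PySem.Chars.join_singleton]
    | cons b r => rw [PySem.Chars.join_cons_cons, ih]; simp

lemma map_slice {α β : Type} (f : α → β) (xs : List α) (a b : Option Int) :
    (PySem.List.slice xs a b).map f = PySem.List.slice (xs.map f) a b := by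
  simp [PySem.List.slice, List.map_take, List.map_drop]

lemma pyRange5_nil (n : Int) (h : n ≤ 0) : PySem.List.pyRange 0 n 5 = [] := by
  rw [PySem.List.pyRange_of_pos 0 n (by norm_num)]
  simp [show ¬ ((0:Int) < n) by omega]

lemma pyRange5_cons (n : Int) (h : 0 < n) :
    PySem.List.pyRange 0 n 5 = 0 :: (PySem.List.pyRange 0 (n - 5) 5).map (· + 5) := by
  rw [PySem.List.pyRange_of_pos 0 n (by norm_num), PySem.List.pyRange_of_pos 0 (n-5) (by norm_num)]
  have hc : (if (0:Int) < n then ((n - 0 + 5 - 1) / 5).toNat else 0)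
      = (if (0:Int) < n - 5 then ((n - 5 - 0 + 5 - 1) / 5).toNat else 0) + 1 := by
    split_ifs <;> omega
  rw [hc, List.range_succ_eq_map]
  simp [List.map_map, Function.comp]
  intro a _
  ring

lemma flatRec_shift (t : List (List Char)) : ∀ i : Int, 0 < i → flatRec t (i + 5) = flatRec t i := by
  induction t with
  | nil => intro i _; rfl
  | cons w r ih =>
    intro i hi
    have hsep : sep5 (i + 5) = sep5 i := by
      unfold sep5
      have h1 : PySem.Int.mod (i+5) 5 = (i+5) % 5 := PySem.Int.mod_eq_emod_of_pos (by norm_num)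
      have h2 : PySem.Int.mod i 5 = i % 5 := PySem.Int.mod_eq_emod_of_pos (by norm_num)
      rw [h1, h2]
      congr 1
      simp
    show (if 0 < i + 5 then sep5 (i+5) else []) ++ w ++ flatRec r (i + 5 + 1) = _
    have : i + 5 + 1 = (i + 1) + 5 := by ring
    rw [this, ih (i+1) (by omega), hsep]
    simp [flatRec, show (0:Int) < i + 5 by omega, show (0:Int) < i from hi]

lemma sep5_lit1 : sep5 1 = [',', ' '] := by decide
lemma sep5_lit2 : sep5 2 = [',', ' '] := by decide
lemma sep5_lit3 : sep5 3 = [',', ' '] := by decide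
lemma sep5_lit4 : sep5 4 = [',', ' '] := by decide
lemma sep5_lit5 : sep5 5 = ['\n'] := by decide

lemma flatRec_chunk (cs : List (List Char)) :
    flatRec cs 0 = PySem.Chars.join [',', ' '] (cs.take 5) ++ flatRec (cs.drop 5) 5 := by
  rcases cs with _ | ⟨a, _ | ⟨b, _ | ⟨c, _ | ⟨d, _ | ⟨e, t⟩⟩⟩⟩⟩ <;>
    simp [flatRec, sep5_lit1, sep5_lit2, sep5_lit3, sep5_lit4,
      PySem.Chars.join_nil, PySem.Chars.join_singleton, PySem.Chars.join_cons_cons]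

lemma flatRec_eq_chunkJoin (cs : List (List Char)) : flatRec cs 0 = chunkJoin cs := by
  induction hn : cs.length using Nat.strong_induction_on generalizing cs with
  | _ n ih =>
  rw [flatRec_chunk, chunkJoin]
  split_ifs with h1 h2
  · subst h1; rfl
  · rw [h2]; rfl
  · rcases hd : cs.drop 5 with _ | ⟨w, t⟩
    · exact absurd hd h2
    have h6 : flatRec t 6 = flatRec t 1 := by
      have := flatRec_shift t 1 (by norm_num); simpa using this
    have hrec : flatRec (w :: t) 5 = '\n' :: flatRec (w :: t) 0 := by
      simp [flatRec, sep5_lit5, h6, show (0:Int) < 5 by norm_num,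
        show (5:Int) + 1 = 6 by norm_num, show (0:Int) + 1 = 1 by norm_num]
    rw [hrec]
    have hlen : (w :: t).length < n := by
      subst hn
      have h5 := congrArg List.length hd
      simp only [List.length_drop] at h5
      have hz0 : cs.length ≠ 0 := fun hz => h1 (List.eq_nil_of_length_eq_zero hz)
      rw [← h5]
      omega
    rw [ih (w :: t).length hlen (w :: t) rfl]

-- A's port, reduced to chunkJoin
lemma a_side (cs : List (List Char)) :
    PySem.Chars.join ['\n'] ((PySem.List.pyRange 0 (cs.length : Int) 5).map
      (fun i => PySem.Chars.join [',', ' '] (PySem.List.slice cs (some i) (some (i + 5)))))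
    = chunkJoin cs := by
  induction hn : cs.length using Nat.strong_induction_on generalizing cs with
  | _ n ih =>
  subst hn
  rcases h0 : cs with _ | ⟨w, t⟩
  · simp [pyRange5_nil 0 (le_refl 0), PySem.Chars.join_nil, chunkJoin]
  rw [← h0]
  have hpos : (0:Int) < (cs.length : Int) := by rw [h0]; simp
  rw [pyRange5_cons _ hpos]
  have hfirst : PySem.List.slice cs (some 0) (some (0 + 5)) = cs.take 5 := by
    rw [show (0:Int) + 5 = 5 by norm_num, PySem.List.slice_toNat cs (by norm_num) (by norm_num)]
    simp
  rw [List.map_cons, hfirst, List.map_map]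
  have hshift : ∀ i ∈ PySem.List.pyRange 0 ((cs.length : Int) - 5) 5,
      ((fun i => PySem.Chars.join [',', ' '] (PySem.List.slice cs (some i) (some (i + 5)))) ∘ (· + 5)) i
      = (fun i => PySem.Chars.join [',', ' '] (PySem.List.slice (cs.drop 5) (some i) (some (i + 5)))) i := by
    intro i hi
    have hi0 : 0 ≤ i := by
      rcases (PySem.List.mem_pyRange_iff_of_pos (by norm_num) i).mp hi with ⟨h1, _⟩
      exact h1
    simp only [Function.comp]
    congr 1
    rw [PySem.List.slice_toNat cs (by omega) (by omega),
        PySem.List.slice_toNat (cs.drop 5) (by omega) (by omega)]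
    rw [List.drop_drop]
    congr 1
    · omega
    · congr 1; omega
  rw [List.map_congr_left hshift]
  by_cases hle : cs.length ≤ 5
  · have hdnil : cs.drop 5 = [] := by
      apply List.eq_nil_of_length_eq_zero; simp only [List.length_drop]; omega
    rw [pyRange5_nil _ (by omega), List.map_nil, PySem.Chars.join_singleton]
    rw [chunkJoin]
    rw [h0] at hle
    simp only [List.length_cons] at hle
    simp [h0]
    omega
  · have hlt : 5 < cs.length := by omega
    have hlen5 : ((cs.length : Int) - 5) = ((cs.drop 5).length : Int) := by
      simp only [List.length_drop]; omega
    rw [hlen5]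
    have ihd : PySem.Chars.join ['\n'] ((PySem.List.pyRange 0 ((cs.drop 5).length : Int) 5).map
        (fun i => PySem.Chars.join [',', ' '] (PySem.List.slice (cs.drop 5) (some i) (some (i + 5)))))
        = chunkJoin (cs.drop 5) := by
      apply ih (cs.drop 5).length _ (cs.drop 5) rfl
      simp only [List.length_drop]; omega
    have hdpos : (0:Int) < ((cs.drop 5).length : Int) := by
      simp only [List.length_drop]; omega
    rcases hmap : (PySem.List.pyRange 0 ((cs.drop 5).length : Int) 5).map
        (fun i => PySem.Chars.join [',', ' '] (PySem.List.slice (cs.drop 5) (some i) (some (i + 5)))) with _ | ⟨m0, mrest⟩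
    · exfalso
      have := pyRange5_cons _ hdpos
      rw [this] at hmap
      simp at hmap
    rw [hmap] at ihd
    rw [PySem.Chars.join_cons_cons, ihd]
    have hne : cs ≠ [] := by rw [h0]; simp
    have hdne : cs.drop 5 ≠ [] := by
      intro hz
      have := congrArg List.length hz
      simp only [List.length_drop, List.length_nil] at this
      omega
    conv_rhs => rw [chunkJoin]
    rw [dif_neg hne, if_neg hdne]
    simp

-- B's fold over the enumerated words, reduced to flatRec
lemma b_side (ws : List String) : ∀ (s : Int) (acc : List String),
    (PySem.Str.join "" ((PySem.List.enumerate ws s).foldl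
      (fun (out : List String) p =>
        (if 0 < p.1 then out ++ [if PySem.Int.mod p.1 5 == 0 then "\n" else ", "] else out) ++ [p.2])
      acc)).toList
    = (acc.map String.toList).flatten ++ flatRec (ws.map String.toList) s := by
  induction ws with
  | nil =>
    intro s acc
    show (PySem.Str.join "" acc).toList = _
    rw [PySem.Str.toList_join, show ("" : String).toList = ([] : List Char) from rfl,
      join_nil_sep_eq_flatten]
    simp [flatRec]
  | cons w t ih =>
    intro s acc
    show (PySem.Str.join "" ((PySem.List.enumerate t (s+1)).foldl _
      ((if 0 < s then acc ++ [if PySem.Int.mod s 5 == 0 then "\n" else ", "] else acc) ++ [w]))).toList = _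
    rw [ih]
    simp only [List.map_append, List.map_cons, List.map_nil, List.flatten_append, flatRec,
      apply_ite (List.map String.toList), apply_ite List.flatten]
    have hsep : [(if PySem.Int.mod s 5 == 0 then ("\n" : String) else ", ").toList].flatten
        = sep5 s := by
      unfold sep5
      cases h : (PySem.Int.mod s 5 == 0)
      · rfl
      · rfl
    rw [hsep]
    by_cases hs : 0 < s <;> simp [hs]

-- the two ports agree on any word list
lemma core_equal (ws : List String) :
    PySem.Str.join "\n" ((PySem.List.pyRange 0 (PySem.List.len ws) 5).map
      (fun i => PySem.Str.join ", " (PySem.List.slice ws (some i) (some (i + 5)))))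
    = PySem.Str.join "" ((PySem.List.enumerate ws 0).foldl
        (fun (out : List String) p =>
          (if 0 < p.1 then out ++ [if PySem.Int.mod p.1 5 == 0 then "\n" else ", "] else out) ++ [p.2])
        []) := by
  apply String.toList_inj.mp
  rw [PySem.Str.toList_join, b_side ws 0 [], flatRec_eq_chunkJoin, ← a_side (ws.map String.toList),
    show ("\n" : String).toList = ['\n'] from rfl]
  simp only [List.map_map, List.map_nil, List.flatten_nil, List.nil_append]
  congr 1
  have hlen : PySem.List.len ws = ((ws.map String.toList).length : Int) := by
    simp [PySem.List.len_eq]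
  rw [hlen]
  apply List.map_congr_left
  intro i _
  simp only [Function.comp]
  rw [PySem.Str.toList_join, map_slice, show (", " : String).toList = [',', ' '] from rfl]

-- ===== VERDICT (by name: the statement is the Claim_ definition above) =====
theorem parse_generator_spec : Claim_equal_parse_generator := by
  intro input _
  show parse_generator input = parse_generator_alt input
  exact core_equal (PySem.Str.split₀ (PySem.Str.replace (PySem.Str.replace (PySem.Str.replace (PySem.Str.replace (PySem.Str.replace (PySem.Str.strip input) "?" " ") "!" " ") "\n" " ") "." " ") "," " "))
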